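-- pv_equiv track=rewrite | github.com/typhasze/traige-gui | src/logic/core.py | _limit_files_by_command_length
-- ===== SOURCE A (Python) =====
-- def _limit_files_by_command_length(filepaths, max_length):
--     selected, total = [], 0
--     for fp in sorted(filepaths, key=len):
--         cost = len(fp) + 3
--         if total + cost > max_length:
--             break
--         selected.append(fp)
--         total += cost
--     return selected
-- ===== SOURCE B (Python) =====
-- def _limit_files_by_command_length(filepaths, max_length):
--     ordered = sorted(filepaths, key=len)
--     prefix = []
--     total = 0
--     for fp in ordered:
--         total += len(fp) + 3
--         prefix.append(total)
--     # prefix is strictly increasing (every cost is positive), so the number of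
--     # files that fit is the rightmost insertion point of max_length: binary search.
--     lo, hi = 0, len(prefix)
--     while lo < hi:
--         mid = (lo + hi) // 2
--         if prefix[mid] <= max_length:
--             lo = mid + 1
--         else:
--             hi = mid
--     return ordered[:lo]
-- ===== Notes on version B (the rewrite author's own statement) =====
-- stated objective: alternative
-- what changed: Replaces A's accumulate-and-break selection loop with a prefix-sum table plus a binary-search (bisect_right) cutoff and a single slice of the sorted list.
import Mathlib
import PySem

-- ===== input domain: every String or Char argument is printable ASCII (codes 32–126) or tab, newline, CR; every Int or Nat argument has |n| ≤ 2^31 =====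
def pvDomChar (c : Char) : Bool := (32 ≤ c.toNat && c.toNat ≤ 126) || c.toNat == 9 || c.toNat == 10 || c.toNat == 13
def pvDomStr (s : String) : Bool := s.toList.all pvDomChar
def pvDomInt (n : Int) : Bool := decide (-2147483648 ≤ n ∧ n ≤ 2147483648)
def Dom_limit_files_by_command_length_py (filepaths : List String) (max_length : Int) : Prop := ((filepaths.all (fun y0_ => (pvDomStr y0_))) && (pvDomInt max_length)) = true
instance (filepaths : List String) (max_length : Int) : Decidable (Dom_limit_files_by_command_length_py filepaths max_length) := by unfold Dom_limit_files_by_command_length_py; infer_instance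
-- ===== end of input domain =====

-- B replaces A's accumulate-and-break loop with a pref-sum table plus a binary-search
-- cutoff and one slice of the sorted list (objective: alternative decomposition, same cost).

-- ===== PORT A =====
-- the 'for fp in sorted(...): ... break' loop, with its accumulator pair (selected, total)
def pvALoop (l : List String) (max_length : Int) (selected : List String) (total : Int) : List String :=
  match l with
  | [] => selected
  | fp :: rest =>
    let cost := PySem.Str.len fp + 3
    if total + cost > max_length then selected
    else pvALoop rest max_length (selected ++ [fp]) (total + cost)

def limit_files_by_command_length_py (filepaths : List String) (max_length : Int) : List String :=
  pvALoop (PySem.List.sorted filepaths PySem.Str.len) max_length [] 0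

-- ===== PORT B =====
-- the 'while lo < hi' binary search of Source B; lo, hi stay within 0..len(pref), so Nat is exact
-- ((lo+hi)//2 on nonnegative ints is Nat division; pref[mid] is in range whenever lo < hi)
-- fuel = hi - lo bound makes the recursion structural; it only guards totality
def pvBisect (pref : List Int) (x : Int) : Nat → Nat → Nat → Nat
  | 0, lo, _ => lo
  | fuel + 1, lo, hi =>
    if lo < hi then
      if PySem.List.pyGetD pref (((lo + hi) / 2 : Nat) : Int) 0 ≤ x then
        pvBisect pref x fuel ((lo + hi) / 2 + 1) hi
      else pvBisect pref x fuel lo ((lo + hi) / 2)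
    else lo

def limit_files_by_command_length_py_alt (filepaths : List String) (max_length : Int) : List String :=
  let ordered := PySem.List.sorted filepaths PySem.Str.len
  -- the 'pref.append(total)' loop: fold carrying (pref, total)
  let acc := ordered.foldl (fun (acc : List Int × Int) fp =>
    let t := acc.2 + (PySem.Str.len fp + 3)
    (acc.1 ++ [t], t)) ([], 0)
  let lo := pvBisect acc.1 max_length acc.1.length 0 acc.1.length
  PySem.List.slice ordered none (some (lo : Int))

-- ===== PRECONDITION & SPEC =====
def Spec_limit_files_by_command_length_py (filepaths : List String) (max_length : Int) (out : List String) : Prop := out = limit_files_by_command_length_py_alt filepaths max_length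
instance (filepaths : List String) (max_length : Int) (out : List String) : Decidable (Spec_limit_files_by_command_length_py filepaths max_length out) := by unfold Spec_limit_files_by_command_length_py; infer_instance

-- ===== CLAIM (what is proved, stated in full; the proofs are below) =====
def Claim_equal_limit_files_by_command_length_py : Prop := ∀ (filepaths : List String) (max_length : Int), Dom_limit_files_by_command_length_py filepaths max_length → Spec_limit_files_by_command_length_py filepaths max_length (limit_files_by_command_length_py filepaths max_length)

-- ===== LEMMAS AND PROOFS =====

-- proof-side view of the pref-sum list starting from running total t
def pvPacc (l : List String) (t : Int) : List Int :=
  match l with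
  | [] => []
  | fp :: rest => (t + (PySem.Str.len fp + 3)) :: pvPacc rest (t + (PySem.Str.len fp + 3))

theorem pvStrLen_nonneg (s : String) : 0 ≤ PySem.Str.len s := by
  simp [PySem.Str.len_eq]

-- every pref sum strictly exceeds the starting total (costs are positive)
theorem pvPacc_gt (l : List String) (t : Int) : ∀ p ∈ pvPacc l t, t < p := by
  induction l generalizing t with
  | nil => simp [pvPacc]
  | cons fp rest ih =>
    intro p hp
    simp only [pvPacc, List.mem_cons] at hp
    rcases hp with h | h
    · have := pvStrLen_nonneg fp; omega
    · have := ih (t + (PySem.Str.len fp + 3)) p h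
      have := pvStrLen_nonneg fp; omega

theorem pvPacc_pairwise (l : List String) (t : Int) : (pvPacc l t).Pairwise (· ≤ ·) := by
  induction l generalizing t with
  | nil => simp [pvPacc]
  | cons fp rest ih =>
    simp only [pvPacc, List.pairwise_cons]
    exact ⟨fun p hp => le_of_lt (pvPacc_gt _ _ p hp), ih _⟩

-- first component of B's fold
theorem pvFold_fst (l : List String) (pre : List Int) (t : Int) :
    (l.foldl (fun (acc : List Int × Int) fp =>
      let t := acc.2 + (PySem.Str.len fp + 3)
      (acc.1 ++ [t], t)) (pre, t)).1 = pre ++ pvPacc l t := by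
  induction l generalizing pre t with
  | nil => simp [pvPacc]
  | cons fp rest ih =>
    simp only [List.foldl_cons, pvPacc]
    rw [ih]
    simp

-- A's loop takes the first k sorted files, k = number of pref sums ≤ max_length
theorem pvALoop_take (l : List String) (m : Int) (sel : List String) (t : Int) :
    pvALoop l m sel t = sel ++ l.take ((pvPacc l t).countP (fun p => decide (p ≤ m))) := by
  induction l generalizing sel t with
  | nil => simp [pvALoop, pvPacc]
  | cons fp rest ih =>
    simp only [pvALoop, pvPacc, List.countP_cons]
    by_cases h : t + (PySem.Str.len fp + 3) > m
    · rw [if_pos h]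
      have hz : (pvPacc rest (t + (PySem.Str.len fp + 3))).countP (fun p => decide (p ≤ m)) = 0 := by
        rw [List.countP_eq_zero]
        intro p hp
        have := pvPacc_gt _ _ p hp
        simp only [decide_eq_true_eq]
        omega
      have hd : decide (t + (PySem.Str.len fp + 3) ≤ m) = false := by
        simp only [decide_eq_false_iff_not]; omega
      rw [hz, hd]
      simp
    · rw [if_neg h, ih]
      have hd : decide (t + (PySem.Str.len fp + 3) ≤ m) = true := by
        simp only [decide_eq_true_eq]; omega
      rw [hd]
      simp [List.take_succ_cons]

-- binary-search invariant: pvBisect returns the split point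
theorem pvBisect_inv (pref : List Int) (x : Int) (hs : pref.Pairwise (· ≤ ·))
    (fuel lo hi : Nat) (hfuel : hi - lo ≤ fuel) (hlohi : lo ≤ hi) (hhil : hi ≤ pref.length)
    (hlo : ∀ j (hj : j < pref.length), j < lo → pref[j] ≤ x)
    (hhi : ∀ j (hj : j < pref.length), hi ≤ j → x < pref[j]) :
    pvBisect pref x fuel lo hi ≤ pref.length ∧
      (∀ j (hj : j < pref.length), j < pvBisect pref x fuel lo hi → pref[j] ≤ x) ∧
      (∀ j (hj : j < pref.length), pvBisect pref x fuel lo hi ≤ j → x < pref[j]) := by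
  induction fuel generalizing lo hi with
  | zero =>
    have : lo = hi := by omega
    subst this
    simp only [pvBisect]
    exact ⟨by omega, hlo, fun j hj hge => hhi j hj hge⟩
  | succ fuel ih =>
    by_cases hlt : lo < hi
    · have hmid : (lo + hi) / 2 < pref.length := by omega
      have hget : PySem.List.pyGetD pref (((lo + hi) / 2 : Nat) : Int) 0 = pref[(lo + hi) / 2] := by
        simp only [PySem.List.pyGetD_natCast, List.getD_eq_getElem?_getD,
          List.getElem?_eq_getElem hmid, Option.getD_some]
      have hpw := List.pairwise_iff_getElem.mp hs
      by_cases hc : pref[(lo + hi) / 2] ≤ x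
      · rw [pvBisect, if_pos hlt, if_pos (by rw [hget]; exact hc)]
        exact ih ((lo + hi) / 2 + 1) hi (by omega) (by omega) hhil
          (fun j hj hjlt => by
            rcases lt_trichotomy j ((lo + hi) / 2) with h | h | h
            · exact le_trans (hpw j ((lo + hi) / 2) hj hmid h) hc
            · exact h ▸ hc
            · omega)
          hhi
      · rw [pvBisect, if_pos hlt, if_neg (by rw [hget]; exact hc)]
        have hxm : x < pref[(lo + hi) / 2] := by omega
        exact ih lo ((lo + hi) / 2) (by omega) (by omega) (by omega) hlo
          (fun j hj hge => by
            rcases Nat.eq_or_lt_of_le hge with h | h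
            · exact h ▸ hxm
            · exact lt_of_lt_of_le hxm (hpw ((lo + hi) / 2) j hmid hj h))
    · rw [pvBisect, if_neg hlt]
      exact ⟨by omega, hlo, fun j hj hge => hhi j hj (by omega)⟩

-- a split point determines the count
theorem pvCount_of_split (pref : List Int) (x : Int) (r : Nat) (hr : r ≤ pref.length)
    (h1 : ∀ j (hj : j < pref.length), j < r → pref[j] ≤ x)
    (h2 : ∀ j (hj : j < pref.length), r ≤ j → x < pref[j]) :
    pref.countP (fun p => decide (p ≤ x)) = r := by
  conv_lhs => rw [← List.take_append_drop r pref]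
  rw [List.countP_append]
  have htake : List.countP (fun p => decide (p ≤ x)) (pref.take r) = (pref.take r).length := by
    rw [List.countP_eq_length]
    intro a ha
    obtain ⟨j, hj, rfl⟩ := List.getElem_of_mem ha
    have hjr : j < r := by simp [List.length_take] at hj; omega
    have hjl : j < pref.length := by simp [List.length_take] at hj; omega
    simp only [List.getElem_take, decide_eq_true_eq]
    exact h1 j hjl hjr
  have hdrop : List.countP (fun p => decide (p ≤ x)) (pref.drop r) = 0 := by
    rw [List.countP_eq_zero]
    intro a ha
    obtain ⟨j, hj, rfl⟩ := List.getElem_of_mem ha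
    have hjl : r + j < pref.length := by simp [List.length_drop] at hj; omega
    simp only [List.getElem_drop, decide_eq_true_eq, not_le]
    exact h2 (r + j) hjl (by omega)
  rw [htake, hdrop, List.length_take]
  omega

theorem pvMain (filepaths : List String) (max_length : Int) :
    limit_files_by_command_length_py filepaths max_length
      = limit_files_by_command_length_py_alt filepaths max_length := by
  unfold limit_files_by_command_length_py limit_files_by_command_length_py_alt
  simp only [pvFold_fst, List.nil_append]
  rw [pvALoop_take]
  set ordered := PySem.List.sorted filepaths PySem.Str.len with hord
  set pref := pvPacc ordered 0 with hpre
  obtain ⟨hr1, hr2, hr3⟩ := pvBisect_inv pref max_length (pvPacc_pairwise _ _)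
    pref.length 0 pref.length (by omega) (Nat.zero_le _) (le_refl _)
    (fun j hj hjl => by omega)
    (fun j hj hge => by omega)
  rw [pvCount_of_split pref max_length (pvBisect pref max_length pref.length 0 pref.length) hr1 hr2 hr3]
  rw [PySem.List.slice_to_natCast]
  simp

-- ===== VERDICT (by name: the statement is the Claim_ definition above) =====
theorem limit_files_by_command_length_py_spec : Claim_equal_limit_files_by_command_length_py := by
  intro filepaths max_length _
  unfold Spec_limit_files_by_command_length_py
  exact pvMain filepaths max_length
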